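-- pv_equiv track=rewrite | github.com/Katedubani/Python | python ADV pr2/fill-pairs.py | fill_pairs
-- ===== SOURCE A (Python) =====
-- def fill_pairs(iterable, fill_element):
-- 	is_odd = False
-- 	if len(iterable) % 2 == 0:
-- 		is_odd = True
--
-- 	it = iter(iterable)
-- 	try:
-- 		for _ in iterable:
-- 			a = next(it)
-- 			b = next(it)
-- 			yield a, b
-- 	except StopIteration:
-- 		if is_odd:
-- 			return
-- 		else:
-- 			b = fill_element
-- 			yield a, b
-- ===== SOURCE B (Python) =====
-- def fill_pairs(iterable, fill_element):
--     # Single pass with a one-slot buffer: no len(), no iterator exceptions.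
--     buf = []
--     for x in iterable:
--         buf.append(x)
--         if len(buf) == 2:
--             yield buf[0], buf[1]
--             buf = []
--     if buf:
--         yield buf[0], fill_element
-- ===== Notes on version B (the rewrite author's own statement) =====
-- stated objective: simpler
-- what changed: Replaces A's exception-driven double-next loop and inverted parity flag (computed from len()) with a single plain for-loop that buffers one element and flushes the buffer after the loop.
import Mathlib
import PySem

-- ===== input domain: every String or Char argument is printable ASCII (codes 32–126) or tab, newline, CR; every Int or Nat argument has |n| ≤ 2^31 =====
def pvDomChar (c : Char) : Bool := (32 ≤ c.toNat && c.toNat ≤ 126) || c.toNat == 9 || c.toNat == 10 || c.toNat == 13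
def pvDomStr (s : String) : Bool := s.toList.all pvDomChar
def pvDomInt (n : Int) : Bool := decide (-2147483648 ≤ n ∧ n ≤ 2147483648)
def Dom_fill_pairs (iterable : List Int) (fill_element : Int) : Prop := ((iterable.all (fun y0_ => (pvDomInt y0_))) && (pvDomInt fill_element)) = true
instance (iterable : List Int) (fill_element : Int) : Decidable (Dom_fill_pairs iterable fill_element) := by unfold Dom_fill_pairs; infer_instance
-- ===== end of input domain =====

-- B replaces A's exception-driven double-next loop and parity flag with one buffered pass (objective: simpler).
-- ===== PORT A =====
-- A's 'for _ in iterable' pulls two elements per step from the iterator; StopIteration on the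
-- second pull with one element buffered yields the fill pair (is_odd, despite its name, is true
-- for EVEN length and makes the handler return silently there). Transliterated as recursion on
-- the iterator's remaining elements, two at a time, with the same three exit cases.
def fill_pairs_loop (it : List Int) (is_odd : Bool) (fill_element : Int) : List (Int × Int) :=
  match it with
  | a :: b :: rest => (a, b) :: fill_pairs_loop rest is_odd fill_element
  | [a] => if is_odd then [] else [(a, fill_element)]   -- StopIteration at 'b = next(it)'
  | [] => []                                            -- StopIteration at 'a = next(it)' (even case) / loop ends

def fill_pairs (iterable : List Int) (fill_element : Int) : List (Int × Int) :=
  let is_odd : Bool := iterable.length % 2 == 0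
  fill_pairs_loop iterable is_odd fill_element

-- ===== PORT B =====
def fill_pairs_alt (iterable : List Int) (fill_element : Int) : List (Int × Int) :=
  let s := iterable.foldl
    (fun (s : List (Int × Int) × List Int) x =>
      let buf := s.2 ++ [x]
      if buf.length == 2 then (s.1 ++ [(buf.getD 0 0, buf.getD 1 0)], [])
      else (s.1, buf))
    ([], [])
  match s.2 with
  | b0 :: _ => s.1 ++ [(b0, fill_element)]
  | [] => s.1

-- ===== PRECONDITION & SPEC =====
def Spec_fill_pairs (iterable : List Int) (fill_element : Int) (out : List (Int × Int)) : Prop := out = fill_pairs_alt iterable fill_element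
instance (iterable : List Int) (fill_element : Int) (out : List (Int × Int)) : Decidable (Spec_fill_pairs iterable fill_element out) := by unfold Spec_fill_pairs; infer_instance

-- ===== CLAIM (what is proved, stated in full; the proofs are below) =====
def Claim_equal_fill_pairs : Prop := ∀ (iterable : List Int) (fill_element : Int), Dom_fill_pairs iterable fill_element → Spec_fill_pairs iterable fill_element (fill_pairs iterable fill_element)

-- ===== LEMMAS AND PROOFS =====
lemma loop_lemma (fe : Int) : ∀ (n : Nat) (xs : List Int) (out : List (Int × Int)) (b : Bool),
    xs.length ≤ n → b = (xs.length % 2 == 0) →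
    (let s := xs.foldl
        (fun (s : List (Int × Int) × List Int) x =>
          let buf := s.2 ++ [x]
          if buf.length == 2 then (s.1 ++ [(buf.getD 0 0, buf.getD 1 0)], [])
          else (s.1, buf))
        (out, []);
      match s.2 with
      | b0 :: _ => s.1 ++ [(b0, fe)]
      | [] => s.1)
    = out ++ fill_pairs_loop xs b fe := by
  intro n
  induction n with
  | zero =>
    intro xs out b hl hb
    cases xs with
    | nil => simp [fill_pairs_loop]
    | cons a t => simp at hl
  | succ n ih =>
    intro xs out b hl hb
    match xs with
    | [] => simp [fill_pairs_loop]
    | [a] =>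
      subst hb
      simp [List.foldl, fill_pairs_loop]
    | a :: c :: rest =>
      have h2 : rest.length ≤ n := by simp at hl; omega
      have hpar : (rest.length + 1 + 1) % 2 = rest.length % 2 := by omega
      have hb' : b = (rest.length % 2 == 0) := by
        subst hb; simp [hpar]
      have := ih rest (out ++ [(a, c)]) b h2 hb'
      simp only [List.foldl] at this ⊢
      simp only [List.nil_append] at this ⊢
      simp at this ⊢
      rw [this]
      subst hb'
      simp [fill_pairs_loop]


-- ===== VERDICT (by name: the statement is the Claim_ definition above) =====
theorem fill_pairs_spec : Claim_equal_fill_pairs := by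
  intro iterable fe _
  unfold Spec_fill_pairs
  have h := loop_lemma fe iterable.length iterable [] (iterable.length % 2 == 0)
    (le_refl _) rfl
  simp only [fill_pairs, fill_pairs_alt]
  simp only [List.nil_append] at h
  exact h.symm
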